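-- pv_equiv track=rewrite | github.com/BEASTRohtih69/8086 | utils.py | format_register_pairs
-- ===== SOURCE A (Python) =====
-- def hex_format(value, width=4):
--     """Format a value as a hexadecimal string with specified width."""
--     return f"0x{value:0{width}X}"
--
-- def format_register_pairs(registers, names):
--     """Format register pairs for display."""
--     lines = []
--     for i in range(0, len(names), 2):
--         if i + 1 < len(names):
--             reg1, reg2 = names[i], names[i+1]
--             val1, val2 = registers[reg1], registers[reg2]
--             lines.append(f"{reg1}: {hex_format(val1)}\t{reg2}: {hex_format(val2)}")
--         else:
--             reg = names[i]
--             val = registers[reg]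
--             lines.append(f"{reg}: {hex_format(val)}")
--     return lines
-- ===== SOURCE B (Python) =====
-- def hex_format(value, width=4):
--     """Format a value as a hexadecimal string with specified width."""
--     return f"0x{value:0{width}X}"
--
-- def format_register_pairs(registers, names):
--     """Format register pairs for display."""
--     formatted = [f"{name}: {hex_format(registers[name])}" for name in names]
--
--     def pair_up(items):
--         if len(items) >= 2:
--             return [items[0] + "\t" + items[1]] + pair_up(items[2:])
--         return list(items)
--
--     return pair_up(formatted)
-- ===== Notes on version B (the rewrite author's own statement) =====
-- stated objective: simpler
-- what changed: Replaces A's single index loop over range(0,len,2) with an interleaved if/else branch by a two-phase shape: one comprehension formats every name left-to-right, then a small recursive pair_up joins consecutive entries with a tab, the odd trailing entry falling out of the base case.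
import Mathlib
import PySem

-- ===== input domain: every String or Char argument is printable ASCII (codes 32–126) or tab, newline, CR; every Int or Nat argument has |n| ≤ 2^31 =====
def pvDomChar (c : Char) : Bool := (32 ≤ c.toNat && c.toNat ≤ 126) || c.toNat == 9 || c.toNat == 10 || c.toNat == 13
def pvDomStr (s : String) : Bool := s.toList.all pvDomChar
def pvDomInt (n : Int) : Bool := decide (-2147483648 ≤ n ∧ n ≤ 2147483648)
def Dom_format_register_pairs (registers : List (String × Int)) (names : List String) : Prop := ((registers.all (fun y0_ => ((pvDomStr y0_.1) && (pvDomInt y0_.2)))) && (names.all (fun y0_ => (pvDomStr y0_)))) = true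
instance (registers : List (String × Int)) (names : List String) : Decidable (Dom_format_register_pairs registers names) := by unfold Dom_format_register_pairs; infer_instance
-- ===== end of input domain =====

-- B builds the formatted strings in one left-to-right pass and then pairs consecutive
-- entries with a small recursion, replacing A's interleaved index loop + if/else (objective: simpler).

-- ===== PORT A =====
-- hex_format(value, width): f"0x{value:0{width}X}" — exact for Python's sign-aware
-- zero padding ('-' counts into the width, zeros go after the sign; no truncation).
def pvHexFormat (value : Int) (width : Nat) : String :=
  let digits := (Nat.toDigits 16 value.natAbs).map Char.toUpper
  let payload := if value < 0 then '-' :: (List.replicate (width - 1 - digits.length) '0' ++ digits)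
                 else List.replicate (width - digits.length) '0' ++ digits
  "0x" ++ String.ofList payload

-- the body of A's `for i in range(0, len(names), 2)` loop
def pvLoopBody (registers : List (String × Int)) (names : List String)
    (lines : List String) (i : Int) : List String :=
  if i + 1 < (names.length : Int) then
    let reg1 := PySem.List.pyGetD names i ""
    let reg2 := PySem.List.pyGetD names (i + 1) ""
    let val1 := PySem.Dict.getD (PySem.Dict.mk registers) reg1 0
    let val2 := PySem.Dict.getD (PySem.Dict.mk registers) reg2 0
    lines ++ [reg1 ++ ": " ++ pvHexFormat val1 4 ++ "\t" ++ (reg2 ++ ": " ++ pvHexFormat val2 4)]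
  else
    let reg := PySem.List.pyGetD names i ""
    let val := PySem.Dict.getD (PySem.Dict.mk registers) reg 0
    lines ++ [reg ++ ": " ++ pvHexFormat val 4]

def format_register_pairs (registers : List (String × Int)) (names : List String) : List String :=
  (PySem.List.pyRange 0 (names.length : Int) 2).foldl (pvLoopBody registers names) []

-- ===== PORT B =====
-- f"{name}: {hex_format(registers[name])}" of B's comprehension
def pvFmt (registers : List (String × Int)) (name : String) : String :=
  name ++ ": " ++ pvHexFormat (PySem.Dict.getD (PySem.Dict.mk registers) name 0) 4

-- B's pair_up: join consecutive entries with a tab; 0- or 1-element tail is returned as is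
def pvPairUp : List String → List String
  | a :: b :: rest => (a ++ "\t" ++ b) :: pvPairUp rest
  | items => items

def format_register_pairs_alt (registers : List (String × Int)) (names : List String) : List String :=
  pvPairUp (names.map (pvFmt registers))

-- ===== PRECONDITION & SPEC =====
-- Pre_ excludes exactly the inputs where Python A raises KeyError: some name not a key of registers.
def Pre_format_register_pairs (registers : List (String × Int)) (names : List String) : Prop :=
  ∀ name ∈ names, name ∈ registers.map Prod.fst
instance (registers : List (String × Int)) (names : List String) : Decidable (Pre_format_register_pairs registers names) := by unfold Pre_format_register_pairs; infer_instance
def pvWitness_format_register_pairs : (List (String × Int)) × List String :=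
  ([("AX", 5), ("BX", -300000)], ["AX", "BX", "AX"])

def Spec_format_register_pairs (registers : List (String × Int)) (names : List String) (out : List String) : Prop := out = format_register_pairs_alt registers names
instance (registers : List (String × Int)) (names : List String) (out : List String) : Decidable (Spec_format_register_pairs registers names out) := by unfold Spec_format_register_pairs; infer_instance

-- ===== CLAIM (what is proved, stated in full; the proofs are below) =====
def Claim_equal_format_register_pairs : Prop := ∀ (registers : List (String × Int)) (names : List String), Dom_format_register_pairs registers names → Pre_format_register_pairs registers names → Spec_format_register_pairs registers names (format_register_pairs registers names)

-- ===== LEMMAS AND PROOFS =====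

lemma pyRange_two_nil {a b : Int} (h : b ≤ a) : PySem.List.pyRange a b 2 = [] := by
  rw [PySem.List.pyRange_of_pos _ _ (by norm_num)]
  rw [if_neg (by omega)]
  simp

lemma pyRange_two_cons {a b : Int} (h : a < b) :
    PySem.List.pyRange a b 2 = a :: PySem.List.pyRange (a + 2) b 2 := by
  rw [PySem.List.pyRange_of_pos _ _ (by norm_num), PySem.List.pyRange_of_pos _ _ (by norm_num)]
  rw [if_pos h]
  by_cases h2 : a + 2 < b
  · rw [if_pos h2]
    have hc : ((b - a + 2 - 1) / 2).toNat = ((b - (a + 2) + 2 - 1) / 2).toNat + 1 := by omega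
    rw [hc, List.range_succ_eq_map]
    simp only [List.map_cons, List.map_map]
    congr 1
    · simp
    · apply List.map_congr_left
      intro k _
      simp only [Function.comp_apply]
      push_cast
      ring
  · rw [if_neg h2]
    have hc : ((b - a + 2 - 1) / 2).toNat = 1 := by omega
    rw [hc]
    simp

lemma pvPyGetD_nat (names : List String) (k : Nat) (hk : k < names.length) :
    PySem.List.pyGetD names (k : Int) "" = names[k] := by
  rw [PySem.List.pyGetD_of_nonneg _ _ (by omega)]
  simp [List.getD, hk]

lemma pvLoop_eq (registers : List (String × Int)) (names : List String) :
    ∀ (fuel k : Nat) (acc : List String), names.length ≤ k + fuel →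
      (PySem.List.pyRange (k : Int) (names.length : Int) 2).foldl (pvLoopBody registers names) acc
        = acc ++ pvPairUp ((names.drop k).map (pvFmt registers)) := by
  intro fuel
  induction fuel with
  | zero =>
    intro k acc h
    rw [pyRange_two_nil (by exact_mod_cast h), List.drop_eq_nil_of_le (by omega)]
    simp [pvPairUp]
  | succ fuel ih =>
    intro k acc h
    by_cases hk : k < names.length
    · rw [pyRange_two_cons (by exact_mod_cast hk)]
      simp only [List.foldl_cons]
      by_cases hk1 : k + 1 < names.length
      · have hbody : pvLoopBody registers names acc (k : Int)
            = acc ++ [pvFmt registers names[k] ++ "\t" ++ pvFmt registers names[k + 1]] := by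
          unfold pvLoopBody
          rw [if_pos (by omega)]
          have h1 : ((k : Int) + 1) = ((k + 1 : Nat) : Int) := by push_cast; ring
          rw [pvPyGetD_nat names k hk, h1, pvPyGetD_nat names (k + 1) hk1]
          rfl
        have h2 : ((k : Int) + 2) = ((k + 2 : Nat) : Int) := by push_cast; ring
        rw [hbody, h2, ih (k + 2) _ (by omega)]
        rw [List.drop_eq_getElem_cons hk, List.drop_eq_getElem_cons hk1]
        simp only [List.map_cons, pvPairUp, List.append_assoc, List.singleton_append]
      · -- k is the last index: one-element line, then the range is exhausted
        have hlast : k + 1 = names.length := by omega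
        have hbody : pvLoopBody registers names acc (k : Int)
            = acc ++ [pvFmt registers names[k]] := by
          unfold pvLoopBody
          rw [if_neg (by omega)]
          rw [pvPyGetD_nat names k hk]
          rfl
        rw [hbody, pyRange_two_nil (by omega)]
        rw [List.drop_eq_getElem_cons hk, List.drop_eq_nil_of_le (by omega)]
        simp [pvPairUp]
    · rw [pyRange_two_nil (by exact_mod_cast Nat.le_of_not_lt hk),
        List.drop_eq_nil_of_le (by omega)]
      simp [pvPairUp]

-- ===== VERDICT (by name: the statement is the Claim_ definition above) =====
theorem format_register_pairs_spec : Claim_equal_format_register_pairs := by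
  intro registers names _ _
  unfold Spec_format_register_pairs format_register_pairs format_register_pairs_alt
  have h := pvLoop_eq registers names names.length 0 [] (by omega)
  simpa using h
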